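-- pv_equiv track=rewrite | github.com/ThomasZumsteg/adventofcode2016 | day01.py | part1
-- ===== SOURCE A (Python) =====
-- def part1(directions):
--     position = (0, 0)
--     heading = (0, 1)
--     turn = {
--         'R': lambda m: (-m[1], m[0]),
--         'L': lambda m: (m[1], -m[0]),
--         }
--     for t, d in directions:
--         heading = turn[t](heading)
--         position = tuple(p + h * d for p, h in zip(position, heading))
--     return sum(abs(p) for p in position)
-- ===== SOURCE B (Python) =====
-- from itertools import accumulate
--
-- _TURN = {'R': 1, 'L': -1}
--
--
-- def _dir(k):
--     k %= 4
--     if k == 0: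
--         return (0, 1)
--     if k == 1:
--         return (-1, 0)
--     if k == 2:
--         return (0, -1)
--     return (1, 0)
--
--
-- def part1(directions):
--     ks = list(accumulate(_TURN[t] for t, _ in directions))
--     x = sum(_dir(k)[0] * d for k, (_, d) in zip(ks, directions))
--     y = sum(_dir(k)[1] * d for k, (_, d) in zip(ks, directions))
--     return abs(x) + abs(y)
-- ===== Notes on version B (the rewrite author's own statement) =====
-- stated objective: alternative
-- what changed: Replaces the stateful simulation (rotating an (x,y) heading vector and updating a position each step) by an arithmetic decomposition: headings become a running integer turn-count (accumulate of +1/-1) indexed mod 4 into a fixed table, and the displacement is summed per axis in separate passes.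
import Mathlib
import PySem

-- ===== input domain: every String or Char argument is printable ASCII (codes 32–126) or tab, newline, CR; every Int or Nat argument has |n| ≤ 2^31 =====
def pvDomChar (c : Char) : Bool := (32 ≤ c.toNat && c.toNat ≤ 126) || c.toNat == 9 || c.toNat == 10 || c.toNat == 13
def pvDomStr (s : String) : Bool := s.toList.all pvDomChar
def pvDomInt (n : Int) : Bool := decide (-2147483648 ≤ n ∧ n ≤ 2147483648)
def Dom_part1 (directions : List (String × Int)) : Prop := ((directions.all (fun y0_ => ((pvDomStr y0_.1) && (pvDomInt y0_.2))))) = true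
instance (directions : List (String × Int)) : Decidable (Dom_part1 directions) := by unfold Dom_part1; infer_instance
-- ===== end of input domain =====

-- B replaces the stateful heading-vector simulation by a turn-count (mod 4) and per-axis sums; same cost, different decomposition.

-- ===== PORT A =====
-- the dict lookup turn[t] raises KeyError for t ∉ {"R","L"}: none there
def part1Loop : List (String × Int) → (Int × Int) → (Int × Int) → Option Int
  | [], pos, _ => some (|pos.1| + |pos.2|)
  | (t, d) :: rest, pos, hd =>
    match (if t = "R" then some (-hd.2, hd.1)
           else if t = "L" then some (hd.2, -hd.1) else none) with
    | none => none
    | some h => part1Loop rest (pos.1 + h.1 * d, pos.2 + h.2 * d) h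

def part1 (directions : List (String × Int)) : Int :=
  (part1Loop directions (0, 0) (0, 1)).getD 0

-- ===== PORT B =====
def dirB (k : Int) : Int × Int :=
  let k := PySem.Int.mod k 4
  if k = 0 then (0, 1)
  else if k = 1 then (-1, 0)
  else if k = 2 then (0, -1)
  else (1, 0)

-- the dict lookup _TURN[t] raises KeyError for t ∉ {"R","L"}: none there
def turnB (t : String) : Option Int :=
  if t = "R" then some 1 else if t = "L" then some (-1) else none

-- the generator (_TURN[t] for t, _ in directions), evaluated lazily by accumulate
def turnsB : List (String × Int) → Option (List Int)
  | [] => some []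
  | p :: rest =>
    match turnB p.1 with
    | none => none
    | some i => (turnsB rest).map (i :: ·)

def part1_alt (directions : List (String × Int)) : Int :=
  match turnsB directions with
  | none => 0
  | some incs =>
    let ks := (incs.scanl (· + ·) 0).tail
    let x := (List.zip ks directions).foldl (fun s p => s + (dirB p.1).1 * p.2.2) 0
    let y := (List.zip ks directions).foldl (fun s p => s + (dirB p.1).2 * p.2.2) 0
    |x| + |y|

-- ===== PRECONDITION & SPEC =====
-- Pre_ excludes exactly the inputs where A's dict lookup raises KeyError (a turn letter other than 'R'/'L')
def Pre_part1 (directions : List (String × Int)) : Prop :=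
  ∀ p ∈ directions, p.1 = "R" ∨ p.1 = "L"
instance (directions : List (String × Int)) : Decidable (Pre_part1 directions) := by
  unfold Pre_part1; infer_instance

def pvWitness_part1 : (List (String × Int)) := [("R", 2), ("L", 3), ("L", 1)]

def Spec_part1 (directions : List (String × Int)) (out : Int) : Prop := out = part1_alt directions
instance (directions : List (String × Int)) (out : Int) : Decidable (Spec_part1 directions out) := by unfold Spec_part1; infer_instance

-- ===== CLAIM (what is proved, stated in full; the proofs are below) =====
def Claim_equal_part1 : Prop := ∀ (directions : List (String × Int)), Dom_part1 directions → Pre_part1 directions → Spec_part1 directions (part1 directions)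

-- ===== LEMMAS AND PROOFS =====

-- the axis-wise displacement sums of the remaining instructions, turn count starting at k
def sx : List (String × Int) → Int → Int
  | [], _ => 0
  | (t, d) :: rest, k =>
    let k' := k + (if t = "R" then 1 else -1)
    (dirB k').1 * d + sx rest k'

def sy : List (String × Int) → Int → Int
  | [], _ => 0
  | (t, d) :: rest, k =>
    let k' := k + (if t = "R" then 1 else -1)
    (dirB k').2 * d + sy rest k'

lemma dirB_emod (k : Int) :
    dirB k = (if k % 4 = 0 then ((0 : Int), (1 : Int))
      else if k % 4 = 1 then (-1, 0) else if k % 4 = 2 then (0, -1) else (1, 0)) := by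
  rw [dirB]
  rw [PySem.Int.mod_eq_emod_of_pos (a := k) (b := 4) (by norm_num)]

lemma dirB_rotR (k : Int) : (-(dirB k).2, (dirB k).1) = dirB (k + 1) := by
  rw [dirB_emod k, dirB_emod (k + 1)]
  have h4 : k % 4 = 0 ∨ k % 4 = 1 ∨ k % 4 = 2 ∨ k % 4 = 3 := by omega
  rcases h4 with h | h | h | h <;>
    simp [show (k + 1) % 4 = (k % 4 + 1) % 4 by omega, *]

lemma dirB_rotL (k : Int) : ((dirB k).2, -(dirB k).1) = dirB (k - 1) := by
  rw [dirB_emod k, dirB_emod (k - 1)]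
  have h4 : k % 4 = 0 ∨ k % 4 = 1 ∨ k % 4 = 2 ∨ k % 4 = 3 := by omega
  rcases h4 with h | h | h | h <;>
    simp [show (k - 1) % 4 = (k % 4 + 3) % 4 by omega, *]

lemma part1Loop_eq (rest : List (String × Int)) :
    ∀ (pos : Int × Int) (k : Int), (∀ p ∈ rest, p.1 = "R" ∨ p.1 = "L") →
      part1Loop rest pos (dirB k) = some (|pos.1 + sx rest k| + |pos.2 + sy rest k|) := by
  induction rest with
  | nil => intro pos k _; simp [part1Loop, sx, sy]
  | cons hd tl ih =>
    intro pos k hpre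
    obtain ⟨t, d⟩ := hd
    have hpre' : ∀ p ∈ tl, p.1 = "R" ∨ p.1 = "L" := fun p hp => hpre p (List.mem_cons_of_mem _ hp)
    rcases hpre (t, d) (by simp) with ht | ht <;> simp only at ht <;> subst ht
    · simp only [part1Loop, sx, sy, String.reduceEq, reduceIte]
      rw [dirB_rotR k, ih _ (k + 1) hpre', ← dirB_rotR k]
      simp only [Option.some.injEq]
      ring_nf
    · simp only [part1Loop, sx, sy, String.reduceEq, reduceIte]
      rw [dirB_rotL k, ih _ (k - 1) hpre']
      have h1 : (dirB (k - 1)).1 = (dirB k).2 := by rw [← dirB_rotL k]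
      have h2 : (dirB (k - 1)).2 = -(dirB k).1 := by rw [← dirB_rotL k]
      simp only [Option.some.injEq, show k + (-1 : Int) = k - 1 from by ring, h1, h2]
      ring_nf

lemma foldl_zip_scanl_x (rest : List (String × Int)) :
    ∀ (k s : Int),
      (List.zip (((rest.map (fun p => if p.1 = "R" then (1 : Int) else -1)).scanl (· + ·) k).tail) rest).foldl
        (fun s p => s + (dirB p.1).1 * p.2.2) s = s + sx rest k := by
  induction rest with
  | nil => intro k s; simp [sx]
  | cons hd tl ih =>
    intro k s
    obtain ⟨t, d⟩ := hd
    simp only [List.map_cons, List.scanl_cons, List.tail_cons, sx]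
    rw [show (List.scanl (· + ·) (k + if t = "R" then (1:Int) else -1)
        (tl.map (fun p => if p.1 = "R" then (1 : Int) else -1)))
        = (k + if t = "R" then (1:Int) else -1) ::
          ((tl.map (fun p => if p.1 = "R" then (1 : Int) else -1)).scanl (· + ·)
            (k + if t = "R" then (1:Int) else -1)).tail from by
      cases tl <;> simp [List.scanl_cons, List.scanl_nil]]
    simp only [List.zip_cons_cons, List.foldl_cons]
    rw [ih]
    ring

lemma foldl_zip_scanl_y (rest : List (String × Int)) :
    ∀ (k s : Int),
      (List.zip (((rest.map (fun p => if p.1 = "R" then (1 : Int) else -1)).scanl (· + ·) k).tail) rest).foldl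
        (fun s p => s + (dirB p.1).2 * p.2.2) s = s + sy rest k := by
  induction rest with
  | nil => intro k s; simp [sy]
  | cons hd tl ih =>
    intro k s
    obtain ⟨t, d⟩ := hd
    simp only [List.map_cons, List.scanl_cons, List.tail_cons, sy]
    rw [show (List.scanl (· + ·) (k + if t = "R" then (1:Int) else -1)
        (tl.map (fun p => if p.1 = "R" then (1 : Int) else -1)))
        = (k + if t = "R" then (1:Int) else -1) ::
          ((tl.map (fun p => if p.1 = "R" then (1 : Int) else -1)).scanl (· + ·)
            (k + if t = "R" then (1:Int) else -1)).tail from by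
      cases tl <;> simp [List.scanl_cons, List.scanl_nil]]
    simp only [List.zip_cons_cons, List.foldl_cons]
    rw [ih]
    ring

lemma turnsB_eq (l : List (String × Int)) (h : ∀ p ∈ l, p.1 = "R" ∨ p.1 = "L") :
    turnsB l = some (l.map (fun p => if p.1 = "R" then (1 : Int) else -1)) := by
  induction l with
  | nil => simp [turnsB]
  | cons hd tl ih =>
    rcases h hd (by simp) with ht | ht <;>
      simp [turnsB, turnB, ht, ih (fun p hp => h p (List.mem_cons_of_mem _ hp))]

-- ===== VERDICT (by name: the statement is the Claim_ definition above) =====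
theorem part1_spec : Claim_equal_part1 := by
  intro directions _ hpre
  unfold Spec_part1 part1 part1_alt
  rw [turnsB_eq directions hpre]
  have h0 : ((0 : Int), (1 : Int)) = dirB 0 := by decide
  rw [h0, part1Loop_eq directions (0, 0) 0 hpre]
  simp [foldl_zip_scanl_x directions 0 0, foldl_zip_scanl_y directions 0 0]
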